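-- pv_equiv track=rewrite | github.com/dzambon/cdg | cdg/geometry/prototype.py | marginal
-- ===== SOURCE A (Python) =====
-- def marginal(dissimilarity_matrix):
--     """
--     Marginal graph. See Definition 6.4 in [1].
--     """
--     marg = -1
--     ct = -1
--     marg_sum = 0
--     for row in dissimilarity_matrix:
--         ct += 1
--         row_sum = sum(row)
--         if row_sum > marg_sum:
--             marg = ct
--             marg_sum = row_sum
--
--     return marg
-- ===== SOURCE B (Python) =====
-- def marginal(dissimilarity_matrix):
--     sums = [sum(row) for row in dissimilarity_matrix]
--     best = max(sums, default=0)
--     return sums.index(best) if best > 0 else -1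
-- ===== Notes on version B (the rewrite author's own statement) =====
-- stated objective: simpler
-- what changed: Replaces the online best-so-far tracking loop with building the list of row sums, then max(..., default=0) and first-occurrence index lookup.
import Mathlib
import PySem

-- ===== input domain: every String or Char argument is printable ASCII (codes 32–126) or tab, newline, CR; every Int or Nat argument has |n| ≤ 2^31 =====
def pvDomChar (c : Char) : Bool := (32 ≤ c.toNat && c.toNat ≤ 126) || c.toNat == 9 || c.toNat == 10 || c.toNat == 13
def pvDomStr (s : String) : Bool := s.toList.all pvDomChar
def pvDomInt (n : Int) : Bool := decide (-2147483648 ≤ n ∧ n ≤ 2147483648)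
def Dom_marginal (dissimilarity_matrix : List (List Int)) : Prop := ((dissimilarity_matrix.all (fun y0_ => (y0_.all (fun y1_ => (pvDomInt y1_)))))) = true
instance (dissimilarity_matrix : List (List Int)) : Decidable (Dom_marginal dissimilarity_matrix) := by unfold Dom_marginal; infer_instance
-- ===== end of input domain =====

-- B builds the list of row sums first, then takes max(.., default=0) and the first-occurrence index,
-- instead of A's online best-so-far tracking loop (same cost; different decomposition).


-- ===== PORT A =====
-- state (marg, ct, marg_sum), updated exactly as A's for-loop does
def marginal (dissimilarity_matrix : List (List Int)) : Int :=
  (dissimilarity_matrix.foldl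
    (fun (st : Int × Int × Int) row =>
      let ct := st.2.1 + 1
      let row_sum := row.foldl (· + ·) 0
      if row_sum > st.2.2 then (ct, ct, row_sum) else (st.1, ct, st.2.2))
    (-1, -1, 0)).1

-- ===== PORT B =====
def marginal_alt (dissimilarity_matrix : List (List Int)) : Int :=
  let sums := dissimilarity_matrix.map (fun row => row.foldl (· + ·) 0)
  let best := (PySem.List.max? sums (fun y => y)).getD 0
  if best > 0 then
    match PySem.List.index? sums best with
    | some k => (k : Int)
    | none => -1          -- unreachable: best ∈ sums whenever best > 0
  else -1

-- ===== PRECONDITION & SPEC =====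
def Spec_marginal (dissimilarity_matrix : List (List Int)) (out : Int) : Prop := out = marginal_alt dissimilarity_matrix
instance (dissimilarity_matrix : List (List Int)) (out : Int) : Decidable (Spec_marginal dissimilarity_matrix out) := by unfold Spec_marginal; infer_instance

-- ===== CLAIM (what is proved, stated in full; the proofs are below) =====
def Claim_equal_marginal : Prop := ∀ (dissimilarity_matrix : List (List Int)), Dom_marginal dissimilarity_matrix → Spec_marginal dissimilarity_matrix (marginal dissimilarity_matrix)

-- ===== LEMMAS AND PROOFS =====

-- first index of v in l (as an Int); total, only used on lists containing v
def firstIdx (v : Int) : List Int → Int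
  | [] => 0
  | x :: l => if x = v then 0 else 1 + firstIdx v l

theorem foldl_max_comm (l : List Int) (a b : Int) :
    l.foldl max (max a b) = max a (l.foldl max b) := by
  induction l generalizing b with
  | nil => simp
  | cons x l ih => simp only [List.foldl_cons, max_assoc, ih]

theorem le_foldl_max' (l : List Int) (b : Int) : b ≤ l.foldl max b := by
  induction l generalizing b with
  | nil => simp
  | cons x l ih => exact le_trans (le_max_left b x) (ih (max b x))

theorem foldl_max_mem (l : List Int) (b : Int) : l.foldl max b ∈ b :: l := by
  induction l generalizing b with
  | nil => simp
  | cons x l ih =>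
    have h := ih (max b x)
    simp only [List.foldl_cons]
    rcases List.mem_cons.1 h with h | h
    · rw [h]
      rcases max_choice b x with h' | h' <;> simp [h']
    · simp [h]

theorem index?_firstIdx (v : Int) (l : List Int) (hv : v ∈ l) :
    ∃ k : Nat, PySem.List.index? l v = some k ∧ (k : Int) = firstIdx v l := by
  induction l with
  | nil => cases hv
  | cons x l ih =>
    by_cases hx : x = v
    · subst hx
      exact ⟨0, PySem.List.index?_cons_self _ _, by simp [firstIdx]⟩
    · have hv' : v ∈ l := by rcases List.mem_cons.1 hv with h | h; exact absurd h.symm hx; exact h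
      obtain ⟨k, hk, hk2⟩ := ih hv'
      refine ⟨k + 1, ?_, ?_⟩
      · rw [PySem.List.index?_cons_of_ne l hx, hk]; rfl
      · simp [firstIdx, hx, ← hk2]; ring

-- the heart: A's fold over the sums list, characterised
theorem loop_char (sums : List Int) (marg i msum : Int) :
    (sums.foldl
      (fun (st : Int × Int × Int) s =>
        if s > st.2.2 then (st.2.1 + 1, st.2.1 + 1, s) else (st.1, st.2.1 + 1, st.2.2))
      (marg, i, msum)).1 =
    if msum < sums.foldl max msum then i + 1 + firstIdx (sums.foldl max msum) sums else marg := by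
  induction sums generalizing marg i msum with
  | nil => simp
  | cons s rest ih =>
    simp only [List.foldl_cons]
    have hcomm := foldl_max_comm rest msum s
    by_cases hs : s > msum
    · simp only [if_pos hs]
      rw [ih]
      have hsM : s ≤ rest.foldl max s := le_foldl_max' rest s
      have hM : rest.foldl max (max msum s) = rest.foldl max s := by
        rw [hcomm]; exact max_eq_right (le_trans (le_of_lt hs) hsM)
      rw [hM]
      have hmsum : msum < rest.foldl max s := lt_of_lt_of_le hs hsM
      rw [if_pos hmsum]
      by_cases hlt : s < rest.foldl max s
      · rw [if_pos hlt]
        have hne : s ≠ rest.foldl max s := ne_of_lt hlt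
        simp [firstIdx, hne]; ring
      · have heq : s = rest.foldl max s := le_antisymm hsM (not_lt.1 hlt)
        rw [if_neg hlt]
        simp [firstIdx, ← heq]
    · simp only [if_neg hs]
      rw [ih]
      have hM : rest.foldl max (max msum s) = rest.foldl max msum := by
        rw [max_eq_left (not_lt.1 (by exact_mod_cast hs))] 
      rw [hM]
      by_cases hmsum : msum < rest.foldl max msum
      · rw [if_pos hmsum, if_pos hmsum]
        have hne : s ≠ rest.foldl max msum :=
          ne_of_lt (lt_of_le_of_lt (not_lt.1 hs) hmsum)
        simp [firstIdx, hne]; ring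
      · rw [if_neg hmsum, if_neg hmsum]

theorem alt_eq_loop (sums : List Int) :
    (if (0:Int) < sums.foldl max 0 then -1 + 1 + firstIdx (sums.foldl max 0) sums else -1) =
    (if ((PySem.List.max? sums (fun y => y)).getD 0) > 0 then
      match PySem.List.index? sums ((PySem.List.max? sums (fun y => y)).getD 0) with
      | some k => (k : Int)
      | none => -1
    else (-1 : Int)) := by
  cases sums with
  | nil => simp [PySem.List.max?]
  | cons x t =>
    rw [PySem.List.max?_id_cons]
    simp only [Option.getD_some]
    have hM : (x :: t).foldl max 0 = max 0 (t.foldl max x) := by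
      simp only [List.foldl_cons]
      exact foldl_max_comm t 0 x
    rw [hM]
    by_cases hb : t.foldl max x > 0
    · rw [if_pos (by omega : (0:Int) < max 0 (t.foldl max x)), if_pos hb]
      have hmem : t.foldl max x ∈ x :: t := foldl_max_mem t x
      obtain ⟨k, hk, hk2⟩ := index?_firstIdx (t.foldl max x) (x :: t) hmem
      rw [max_eq_right (le_of_lt hb), hk]
      show -1 + 1 + firstIdx (t.foldl max x) (x :: t) = (k : Int)
      omega
    · rw [if_neg (by omega : ¬ (0:Int) < max 0 (t.foldl max x)), if_neg hb]

theorem marginal_eq (m : List (List Int)) : marginal m = marginal_alt m := by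
  have h1 : marginal m =
      (List.foldl (fun (st : Int × Int × Int) s =>
          if s > st.2.2 then (st.2.1 + 1, st.2.1 + 1, s) else (st.1, st.2.1 + 1, st.2.2))
        (-1, -1, 0) (m.map (fun row => row.foldl (· + ·) 0))).1 := by
    unfold marginal
    rw [List.foldl_map]
  rw [h1, loop_char, alt_eq_loop]
  rfl

-- ===== VERDICT (by name: the statement is the Claim_ definition above) =====
theorem marginal_spec : Claim_equal_marginal := by
  intro m _
  unfold Spec_marginal
  exact marginal_eq m
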